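-- pv_equiv track=rewrite | github.com/Mezz-Davies/AdventOfCode | 2017/4/main.py | isValidPassphraseWithAnagrams
-- ===== SOURCE A (Python) =====
-- def isValidPassphraseWithAnagrams(passphrase : str) -> bool:
--     lookup = {}
--     words = passphrase.split(' ')
--     for word in words:
--         sortedCharacters = sorted(word)
--         sortedWord = "".join(sortedCharacters)
--         if sortedWord in lookup:
--             return False
--         else:
--             lookup[sortedWord] = True
--
--     return True
-- ===== SOURCE B (Python) =====
-- def isAnagram(u, v):
--     pool = list(v)
--     for c in u:
--         if c in pool:
--             pool.remove(c)
--         else: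
--             return False
--     return pool == []
--
-- def isValidPassphraseWithAnagrams(passphrase : str) -> bool:
--     words = passphrase.split(' ')
--     for i in range(len(words)):
--         for j in range(i):
--             if isAnagram(words[i], words[j]):
--                 return False
--     return True
-- ===== Notes on version B (the rewrite author's own statement) =====
-- stated objective: alternative
-- what changed: B never canonicalizes words and uses no set/dict: it compares every pair of words directly, testing the anagram relation by eliminating each character of one word from a mutable copy of the other, instead of A's sorted-letter keys stored in a hash table with an early-exit lookup.
import Mathlib
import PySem

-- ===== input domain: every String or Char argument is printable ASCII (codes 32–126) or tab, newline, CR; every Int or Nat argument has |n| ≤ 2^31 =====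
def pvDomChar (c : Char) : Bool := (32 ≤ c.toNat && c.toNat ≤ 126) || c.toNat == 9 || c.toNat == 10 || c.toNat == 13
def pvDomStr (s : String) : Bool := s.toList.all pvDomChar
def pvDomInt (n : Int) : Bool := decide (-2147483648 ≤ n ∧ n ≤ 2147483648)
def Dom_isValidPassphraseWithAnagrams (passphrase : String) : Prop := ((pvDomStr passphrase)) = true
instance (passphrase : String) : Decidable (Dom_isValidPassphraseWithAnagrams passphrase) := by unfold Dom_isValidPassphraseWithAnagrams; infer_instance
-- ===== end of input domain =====

-- B drops A's sorted-letter keys and lookup dict entirely: it compares every pair of words directly, testing the anagram relation by eliminating characters from a copy of the other word (alternative algorithm; no speed claim).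


-- ===== PORT A =====
-- sortedWord = "".join(sorted(word)) — A's normalization of one word
def pvNorm (w : List Char) : List Char :=
  PySem.Chars.join [] ((PySem.List.sorted w (fun c => c) false).map (fun c => [c]))

-- the 'for word in words' loop with its early return and the lookup dict
def pvGoA : List (List Char) → PySem.Dict (List Char) Bool → Bool
  | [], _ => true
  | w :: ws, lookup =>
    let sortedWord := pvNorm w
    if lookup.contains sortedWord then false
    else pvGoA ws (lookup.insert sortedWord true)

def isValidPassphraseWithAnagrams (passphrase : String) : Bool :=
  pvGoA (PySem.Chars.splitOn passphrase.toList [' ']) PySem.Dict.empty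

-- ===== PORT B =====
-- isAnagram's 'for c in u' loop over the mutable pool copied from v
def pvElim : List Char → List Char → Bool
  | [], pool => pool == []
  | c :: cs, pool =>
    if pool.contains c then pvElim cs (pool.erase c)   -- 'pool.remove(c)' on a present element
    else false

def pvIsAnagram (u v : List Char) : Bool := pvElim u v

-- 'for i in range(len(words)): for j in range(i): …' — prev carries words[0..i-1] in order
def pvGoB : List (List Char) → List (List Char) → Bool
  | _, [] => true
  | prev, w :: ws =>
    if prev.any (fun p => pvIsAnagram w p) then false
    else pvGoB (prev ++ [w]) ws

def isValidPassphraseWithAnagrams_alt (passphrase : String) : Bool :=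
  pvGoB [] (PySem.Chars.splitOn passphrase.toList [' '])

-- ===== PRECONDITION & SPEC =====
def Spec_isValidPassphraseWithAnagrams (passphrase : String) (out : Bool) : Prop := out = isValidPassphraseWithAnagrams_alt passphrase
instance (passphrase : String) (out : Bool) : Decidable (Spec_isValidPassphraseWithAnagrams passphrase out) := by unfold Spec_isValidPassphraseWithAnagrams; infer_instance

-- ===== CLAIM =====
def Claim_equal_isValidPassphraseWithAnagrams : Prop := ∀ (passphrase : String), Dom_isValidPassphraseWithAnagrams passphrase → Spec_isValidPassphraseWithAnagrams passphrase (isValidPassphraseWithAnagrams passphrase)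

-- ===== LEMMAS AND PROOFS =====

-- A's normalization is just the sorted character list
lemma pvNorm_eq (w : List Char) : pvNorm w = PySem.List.sorted w (fun c => c) false :=
  PySem.Chars.join_nil_singletons (PySem.List.sorted w (fun c => c) false)

-- two words have the same normal form iff they are permutations of each other
lemma pvNorm_eq_iff (u v : List Char) : pvNorm u = pvNorm v ↔ u.Perm v := by
  rw [pvNorm_eq, pvNorm_eq, PySem.List.sorted_id_eq_sorted_id_iff_perm]

-- A's loop succeeds iff the dict keys together with the normalized remaining words are all distinct
lemma pvGoA_iff (ws : List (List Char)) (d : PySem.Dict (List Char) Bool)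
    (hd : d.keys.Nodup) :
    pvGoA ws d = true ↔ (d.keys ++ ws.map pvNorm).Nodup := by
  induction ws generalizing d with
  | nil => simpa [pvGoA] using hd
  | cons w ws ih =>
    simp only [pvGoA, List.map_cons]
    by_cases hc : d.contains (pvNorm w) = true
    · simp only [hc, if_true]
      constructor
      · intro h; exact absurd h (by simp)
      · intro h
        exact ((List.nodup_append.mp h).2.2 _
          ((PySem.Dict.contains_iff_mem_keys d _).mp hc) _ (by simp)) rfl |>.elim
    · have hc' : d.contains (pvNorm w) = false := by simpa using hc
      rw [hc']
      simp only [Bool.false_eq_true, if_false]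
      rw [ih _ (PySem.Dict.nodup_keys_insert d _ _ hd),
          PySem.Dict.keys_insert_of_not_contains d _ hc']
      rw [List.append_assoc, List.singleton_append]

-- the elimination loop of B decides the permutation relation
lemma pvElim_iff (u pool : List Char) : pvElim u pool = true ↔ u.Perm pool := by
  induction u generalizing pool with
  | nil =>
    rw [pvElim]
    simp [List.nil_perm]
  | cons c cs ih =>
    rw [pvElim]
    by_cases hc : pool.contains c = true
    · rw [if_pos hc, ih, List.cons_perm_iff_perm_erase]
      have : c ∈ pool := by simpa using hc
      simp [this]
    · rw [if_neg hc]
      simp only [Bool.false_eq_true, false_iff]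
      intro hp
      exact hc (by simpa using hp.mem_iff.mp (by simp : c ∈ c :: cs))

-- B's nested loop succeeds iff no later word is an anagram of an earlier one (including prev)
lemma pvGoB_iff (rest prev : List (List Char)) :
    pvGoB prev rest = true ↔
      rest.Pairwise (fun a b => ¬ b.Perm a) ∧ ∀ w ∈ rest, ∀ p ∈ prev, ¬ w.Perm p := by
  induction rest generalizing prev with
  | nil => simp [pvGoB]
  | cons w ws ih =>
    rw [pvGoB]
    by_cases h : (prev.any fun p => pvIsAnagram w p) = true
    · rw [if_pos h]
      obtain ⟨p, hp, hper⟩ := List.any_eq_true.mp h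
      have hwp : w.Perm p := (pvElim_iff w p).mp hper
      constructor
      · intro hf; exact (Bool.false_ne_true hf).elim
      · rintro ⟨-, hall⟩
        exact (hall w (List.mem_cons_self) p hp hwp).elim
    · rw [if_neg h, ih, List.pairwise_cons]
      have hnone : ∀ p ∈ prev, ¬ w.Perm p := by
        intro p hp hper
        exact h (List.any_eq_true.mpr ⟨p, hp, (pvElim_iff w p).mpr hper⟩)
      constructor
      · rintro ⟨hpw, hall⟩
        refine ⟨⟨fun b hb hper => hall b hb w (by simp) hper, hpw⟩, ?_⟩
        intro v hv p hp
        rcases List.mem_cons.mp hv with rfl | hv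
        · exact hnone p hp
        · exact hall v hv p (List.mem_append_left _ hp)
      · rintro ⟨⟨hw, hpw⟩, hall⟩
        refine ⟨hpw, ?_⟩
        intro v hv p hp
        rcases List.mem_append.mp hp with hp | hp
        · exact hall v (List.mem_cons_of_mem _ hv) p hp
        · rcases List.mem_singleton.mp hp with rfl
          exact hw v hv

-- ===== VERDICT =====
theorem isValidPassphraseWithAnagrams_spec : Claim_equal_isValidPassphraseWithAnagrams := by
  intro p _
  unfold Spec_isValidPassphraseWithAnagrams isValidPassphraseWithAnagrams isValidPassphraseWithAnagrams_alt
  set ws := PySem.Chars.splitOn p.toList [' '] with hws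
  have hA : pvGoA ws PySem.Dict.empty = true ↔ (ws.map pvNorm).Nodup := by
    rw [pvGoA_iff _ _ (by simp [PySem.Dict.keys_empty])]
    simp [PySem.Dict.keys_empty]
  have hnd : (ws.map pvNorm).Nodup ↔ ws.Pairwise (fun a b => ¬ b.Perm a) := by
    rw [List.Nodup, List.pairwise_map]
    constructor <;> intro h <;> refine h.imp ?_ <;> intro a b hab
    · exact fun hper => hab ((pvNorm_eq_iff a b).mpr hper.symm)
    · exact fun he => hab (((pvNorm_eq_iff a b).mp he).symm)
  have hB : pvGoB [] ws = true ↔ ws.Pairwise (fun a b => ¬ b.Perm a) := by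
    rw [pvGoB_iff]
    simp
  exact Bool.eq_iff_iff.mpr ((hA.trans hnd).trans hB.symm)
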